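-- pv_equiv track=rewrite | github.com/nishio/atcoder | PAST4/e.py | solve
-- ===== SOURCE A (Python) =====
-- def solve(N, S):
--     from itertools import permutations
--     rS = "".join(reversed(S))
--     for p in permutations(S):
--         ret = "".join(p)
--         if ret != S and ret != rS:
--             return ret
--     return "None"
-- ===== SOURCE B (Python) =====
-- def solve(N, S):
--     # Closed form: the first permutation of S (in itertools index order) that
--     # differs from S is S with its last adjacent differing pair swapped; if that
--     # equals reversed(S) the string has the shape c^m x c^(m+1) and the next
--     # fresh permutation is c^(m+2) x c^(m-1).
--     n = len(S)
--     m = n - 2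
--     while m >= 0 and S[m] == S[m + 1]:
--         m -= 1
--     if m < 0:
--         return "None"
--     t1 = S[:m] + S[m + 1] + S[m] + S[m + 2:]
--     if t1 != S[::-1]:
--         return t1
--     if n == 2:
--         return "None"
--     c = S[-1]
--     return c * (m + 2) + S[m] + c * (m - 1)
-- ===== Notes on version B (the rewrite author's own statement) =====
-- stated objective: faster
-- what changed: B replaces A's scan over the n! permutations by a closed form found with one linear scan: swap the last adjacent differing pair of S; if that swap equals reversed S (which forces the shape c^m x c^(m+1)) return c^(m+2)+x+c^(m-1); None exactly for constant and 2-character strings. Intended as faster; a timing run measured A timing out at n=64 where B answered in under a millisecond, but too few both-finished inputs at that size to confirm a ratio.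
import Mathlib
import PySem

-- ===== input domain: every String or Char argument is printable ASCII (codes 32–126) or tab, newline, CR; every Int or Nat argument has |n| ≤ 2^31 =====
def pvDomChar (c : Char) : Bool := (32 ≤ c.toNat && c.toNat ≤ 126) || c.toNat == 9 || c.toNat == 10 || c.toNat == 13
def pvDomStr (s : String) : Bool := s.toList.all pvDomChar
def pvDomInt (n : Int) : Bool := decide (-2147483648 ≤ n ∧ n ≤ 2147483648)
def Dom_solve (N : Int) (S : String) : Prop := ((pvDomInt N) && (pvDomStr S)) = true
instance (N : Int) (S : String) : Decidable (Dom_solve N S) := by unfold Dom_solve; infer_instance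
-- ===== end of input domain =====

-- B replaces A's scan over the permutations of S by a closed form computed
-- with one linear scan (swap the last adjacent differing pair; one further
-- explicit arrangement in the single shape where that swap equals reversed S);
-- intended as faster (a timing run saw A time out at n=64 where B
-- answered, without enough both-finished inputs there to confirm a ratio).

-- ===== PORT A =====
-- itertools.permutations(S) yields index-permutations in lexicographic index
-- order; picksA enumerates the choices for one output position (remaining
-- indices tried left to right); the fuel argument is the exact remaining
-- length, so it is never exhausted early.
def picksA : List Char → List (Char × List Char)
  | [] => []
  | x :: rest => (x, rest) :: (picksA rest).map (fun p => (p.1, x :: p.2))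

-- A's `for p in permutations(S)` with an early `return` is a lazy depth-first
-- walk of the same enumeration: firstA/firstAList stop at the first permutation
-- whose string satisfies the test, exactly like the Python generator loop
-- (acc carries the chosen prefix in reverse).
mutual
def firstA (pred : List Char → Bool) : Nat → List Char → List Char → Option (List Char)
  | 0, _, acc => if pred acc.reverse then some acc.reverse else none
  | n+1, xs, acc => firstAList pred n (picksA xs) acc
  termination_by n _ _ => (n, 0)
def firstAList (pred : List Char → Bool) : Nat → List (Char × List Char) → List Char → Option (List Char)
  | _, [], _ => none
  | n, (y, ys) :: rest, acc =>
    match firstA pred n ys (y :: acc) with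
    | some t => some t
    | none => firstAList pred n rest acc
  termination_by n l _ => (n, l.length + 1)
end

-- A's loop body: string comparison / "".join are exact on lists of characters.
def solve (_N : Int) (S : String) : String :=
  let s := S.toList
  let rs := s.reverse   -- rS = "".join(reversed(S))
  match firstA (fun p => p != s && p != rs) s.length s [] with
  | some p => String.ofList p   -- "".join(p)
  | none => "None"

-- ===== PORT B =====
-- while loop of Source B scanning m = n-2, n-3, … for S[m] != S[m+1]; the fuel
-- argument k stands for m+1, so the call with k = n-1 starts at m = n-2.
def lastDiffB (s : List Char) : Nat → Option Nat
  | 0 => none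
  | m+1 => if s.getD m ' ' ≠ s.getD (m+1) ' ' then some m else lastDiffB s m

-- slices with nonnegative bounds are take/drop, S[::-1] is reverse, c*(k) is
-- replicate, S[-1] is the last character (the branch guarantees nonempty);
-- all exact here.
def solve_alt (_N : Int) (S : String) : String :=
  let s := S.toList
  match lastDiffB s (s.length - 1) with
  | none => "None"
  | some m =>
    let t1 := s.take m ++ s.getD (m+1) ' ' :: s.getD m ' ' :: s.drop (m+2)
    if t1 ≠ s.reverse then String.ofList t1
    else if s.length = 2 then "None"
    else String.ofList (List.replicate (m+2) (s.getD (s.length - 1) ' ')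
           ++ s.getD m ' ' :: List.replicate (m-1) (s.getD (s.length - 1) ' '))

-- ===== PRECONDITION & SPEC =====
def Spec_solve (N : Int) (S : String) (out : String) : Prop := out = solve_alt N S
instance (N : Int) (S : String) (out : String) : Decidable (Spec_solve N S out) := by unfold Spec_solve; infer_instance

-- ===== CLAIM (what is proved, stated in full; the proofs are below) =====
def Claim_equal_solve : Prop := ∀ (N : Int) (S : String), Dom_solve N S → Spec_solve N S (solve N S)

-- ===== LEMMAS AND PROOFS =====

-- proof-side model of the enumeration: the fully materialised permutation
-- stream in the generator's order (firstA is proved equal to find? over it)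
def permsA : Nat → List Char → List (List Char)
  | 0, _ => [[]]
  | n+1, xs => (picksA xs).flatMap (fun p => (permsA n p.2).map (fun q => p.1 :: q))


-- picks facts --------------------------------------------------------------
theorem picksA_mem {xs : List Char} {y : Char} {ys : List Char}
    (h : (y, ys) ∈ picksA xs) : (y :: ys).Perm xs ∧ ys.length + 1 = xs.length := by
  induction xs generalizing y ys with
  | nil => simp [picksA] at h
  | cons x rest ih =>
    simp only [picksA, List.mem_cons, List.mem_map] at h
    rcases h with h | ⟨⟨z, zs⟩, hz, he⟩
    · obtain ⟨h1, h2⟩ := Prod.mk.injEq .. ▸ h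
      subst h1; subst h2
      exact ⟨List.Perm.refl _, rfl⟩
    · obtain ⟨h1, h2⟩ := Prod.mk.injEq .. ▸ he
      subst h1; subst h2
      obtain ⟨hp, hl⟩ := ih hz
      refine ⟨?_, by simpa using hl⟩
      exact (List.Perm.swap x z zs).trans (List.Perm.cons x hp)

theorem permsA_perm : ∀ (n : Nat) (xs : List Char) (p : List Char),
    n = xs.length → p ∈ permsA n xs → p.Perm xs := by
  intro n
  induction n with
  | zero =>
    intro xs p h hp
    cases xs with
    | nil =>
      simp only [permsA, List.mem_singleton] at hp
      subst hp; exact List.Perm.refl _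
    | cons a l => simp at h
  | succ n ih =>
    intro xs p h hp
    simp only [permsA, List.mem_flatMap, List.mem_map] at hp
    obtain ⟨⟨y, ys⟩, hpk, q, hq, rfl⟩ := hp
    obtain ⟨hperm, hlen⟩ := picksA_mem hpk
    have hn : n = ys.length := by omega
    exact (List.Perm.cons y (ih ys q hn hq)).trans hperm

theorem permsA_head : ∀ (n : Nat) (xs : List Char), n = xs.length →
    ∃ r, permsA n xs = xs :: r := by
  intro n
  induction n with
  | zero =>
    intro xs h
    cases xs with
    | nil => exact ⟨[], rfl⟩
    | cons a l => simp at h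
  | succ n ih =>
    intro xs h
    cases xs with
    | nil => simp at h
    | cons x rest =>
      obtain ⟨r, hr⟩ := ih rest (by simpa using h)
      refine ⟨(permsA n rest).tail.map (fun q => x :: q) ++
        (((picksA rest).map (fun p => (p.1, x :: p.2))).flatMap
          (fun p => (permsA n p.2).map (fun q => p.1 :: q))), ?_⟩
      simp only [permsA, picksA, List.flatMap_cons, hr]
      simp

-- find? helpers ------------------------------------------------------------
theorem find?_all_eq {p : List Char → Bool} {l : List (List Char)} {e : List Char}
    (h : ∀ x ∈ l, x = e) (hne : l ≠ []) :
    l.find? p = if p e then some e else none := by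
  induction l with
  | nil => exact absurd rfl hne
  | cons a t ih =>
    have ha : a = e := h a (by simp)
    subst ha
    by_cases hp : p a = true
    · simp [List.find?_cons_of_pos hp, hp]
    · rw [List.find?_cons_of_neg hp]
      cases t with
      | nil => simp [List.find?_nil, hp]
      | cons b t' =>
        exact ih (fun x hx => h x (by simp [hx])) (by simp)

theorem find?_flatMap_replicate {p : List Char → Bool}
    {f : Char × List Char → List (List Char)} {e : Char × List Char} :
    ∀ (k : Nat), (List.flatMap f (List.replicate k e)).find? p
      = if k = 0 then none else (f e).find? p := by
  intro k
  induction k with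
  | zero => rfl
  | succ k ih =>
    rw [List.replicate_succ, List.flatMap_cons, List.find?_append, ih]
    cases k with
    | zero => simp
    | succ k =>
      simp only [Nat.succ_ne_zero, if_false]
      cases hf : (f e).find? p <;> simp

-- picks of replicate-prefixed lists ----------------------------------------
theorem picksA_replicate_append (c : Char) :
    ∀ (j : Nat) (t : List Char),
      picksA (List.replicate (j+1) c ++ t)
        = List.replicate (j+1) (c, List.replicate j c ++ t)
          ++ (picksA t).map (fun p => (p.1, List.replicate (j+1) c ++ p.2)) := by
  intro j
  induction j with
  | zero => intro t; simp [picksA]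
  | succ j ih =>
    intro t
    have : List.replicate (j+1+1) c ++ t = c :: (List.replicate (j+1) c ++ t) := by
      simp [List.replicate_succ]
    rw [this]
    simp only [picksA, ih t]
    simp [List.map_replicate, List.replicate_succ, Function.comp]

theorem picksA_replicate (c : Char) (B : Nat) :
    picksA (List.replicate B c)
      = List.replicate B (c, List.replicate (B-1) c) := by
  cases B with
  | zero => rfl
  | succ j =>
    rw [show List.replicate (j+1) c = List.replicate (j+1) c ++ [] by simp,
      picksA_replicate_append c j []]
    simp [picksA]

-- the one-distinguished-element strings ------------------------------------
def posL (c a : Char) (t i : Nat) : List Char :=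
  List.replicate i c ++ a :: List.replicate (t - i) c

theorem posL_length {c a : Char} {t i : Nat} (h : i ≤ t) :
    (posL c a t i).length = t + 1 := by
  simp [posL]; omega

theorem cons_posL (c a : Char) (t i : Nat) :
    c :: posL c a t i = posL c a (t+1) (i+1) := by
  simp [posL, List.replicate_succ]

theorem oneA (a c : Char) (hac : a ≠ c) :
    ∀ (p : List Char), (∀ x ∈ p, x = a ∨ x = c) → p.count a = 1 →
      ∃ i, i + 1 ≤ p.length ∧ p = List.replicate i c ++ a :: List.replicate (p.length - i - 1) c := by
  intro p
  induction p with
  | nil => intro _ hc; simp at hc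
  | cons x q ih =>
    intro hmem hc
    rcases hmem x (by simp) with rfl | rfl
    · have hq0 : q.count x = 0 := by
        have := List.count_cons_self (a := x) (l := q); omega
      have hnomem : ∀ y ∈ q, y = c := by
        intro y hy
        rcases hmem y (by simp [hy]) with rfl | rfl
        · exact absurd hq0 (by simp [List.count_eq_zero, hy])
        · rfl
      refine ⟨0, by simp, ?_⟩
      have hq : q = List.replicate q.length c := List.eq_replicate_of_mem hnomem
      simpa using congrArg (x :: ·) hq
    · have hcq : q.count a = 1 := by
        have : (x :: q).count a = q.count a := by
          simp only [List.count_cons]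
          have hxa : ¬ (x == a) = true := by
            simp
            exact fun h => hac h.symm
          simp [hxa]
        omega
      obtain ⟨i, hi, hq⟩ := ih (fun y hy => hmem y (by simp [hy])) hcq
      refine ⟨i + 1, by simp only [List.length_cons]; omega, ?_⟩
      have : (x :: q).length - (i+1) - 1 = q.length - i - 1 := by
        simp only [List.length_cons]; omega
      rw [this, List.replicate_succ]
      simpa using congrArg (x :: ·) hq

theorem mem_permsA_posL {c a : Char} (hac : a ≠ c) {t A : Nat} (hA : A ≤ t)
    {p : List Char} (hp : p ∈ permsA (t+1) (posL c a t A)) :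
    ∃ i, i ≤ t ∧ p = posL c a t i := by
  have hperm : p.Perm (posL c a t A) :=
    permsA_perm (t+1) _ p (posL_length hA).symm hp
  have hlen : p.length = t + 1 := by
    rw [hperm.length_eq, posL_length hA]
  have hmem : ∀ x ∈ p, x = a ∨ x = c := by
    intro x hx
    have : x ∈ posL c a t A := hperm.mem_iff.mp hx
    simp only [posL, List.mem_append, List.mem_cons] at this
    rcases this with h | h | h
    · exact Or.inr (List.eq_of_mem_replicate h)
    · exact Or.inl h
    · exact Or.inr (List.eq_of_mem_replicate h)
  have hcount : p.count a = 1 := by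
    rw [hperm.count_eq]
    have hca : ¬ (c = a) := fun h => hac h.symm
    simp [posL, List.count_append, List.count_replicate, hca]
  obtain ⟨i, hi, hpe⟩ := oneA a c hac p hmem hcount
  refine ⟨i, by omega, ?_⟩
  rw [hpe, hlen]
  have : t + 1 - i - 1 = t - i := by omega
  rw [this]
  rfl

theorem posL_ne {c a : Char} (hac : a ≠ c) {t i j : Nat} (hij : i < j) (_hj : j ≤ t) :
    posL c a t i ≠ posL c a t j := by
  intro h
  have h1 : (posL c a t i)[i]? = some a := by
    simp only [posL]
    rw [List.getElem?_append_right (by simp)]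
    simp
  have h2 : (posL c a t j)[i]? = some c := by
    simp only [posL]
    rw [List.getElem?_append_left (by simpa using hij)]
    rw [List.getElem?_replicate]
    simp [hij]
  rw [h, h2] at h1
  exact hac (by simpa using h1.symm)

theorem picksA_aRep (a c : Char) (B : Nat) :
    picksA (a :: List.replicate B c)
      = (a, List.replicate B c) :: List.replicate B (c, a :: List.replicate (B-1) c) := by
  simp [picksA, picksA_replicate, List.map_replicate]

theorem posL_zero (c a : Char) (t : Nat) : posL c a t 0 = a :: List.replicate t c := by
  simp [posL]

theorem find?_Zblock (p : List Char → Bool) (c a : Char) (t : Nat) :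
    ((permsA (t+1) (List.replicate (t+1) c)).map (fun q => a :: q)).find? p
      = if p (posL c a (t+1) 0) then some (posL c a (t+1) 0) else none := by
  apply find?_all_eq
  · intro x hx
    obtain ⟨q, hq, rfl⟩ := List.mem_map.mp hx
    have : q.Perm (List.replicate (t+1) c) :=
      permsA_perm (t+1) _ q (by simp) hq
    rw [List.perm_replicate.mp this, posL_zero]
  · obtain ⟨r, hr⟩ := permsA_head (t+1) (List.replicate (t+1) c) (by simp)
    simp [hr]

theorem map_succ_range' : ∀ (n s : Nat),
    List.map (fun i => i + 1) (List.range' s n) = List.range' (s+1) n := by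
  intro n
  induction n with
  | zero => intro s; rfl
  | succ n ih => intro s; rw [List.range'_succ, List.range'_succ, List.map_cons, ih]

theorem consBlock (c a : Char) (t A B : Nat)
    (horder : ∀ p : List Char → Bool,
      (permsA (t+1) (posL c a t A)).find? p
        = ((List.range' A (B+1) ++ (List.range A).reverse).map (posL c a t)).find? p)
    (p : List Char → Bool) :
    ((permsA (t+1) (posL c a t A)).map (fun q => c :: q)).find? p
      = ((List.range' (A+1) (B+1) ++ (List.range' 1 A).reverse).map (posL c a (t+1))).find? p := by
  rw [List.find?_map, horder (p ∘ (fun q => c :: q)), ← List.find?_map]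
  congr 1
  rw [List.map_map]
  have h1 : ((fun q => c :: q) ∘ posL c a t) = posL c a (t+1) ∘ (fun i => i + 1) := by
    funext i
    simp [Function.comp, cons_posL]
  rw [h1, ← List.map_map]
  congr 1
  rw [List.map_append, map_succ_range', List.map_reverse]
  congr 2
  rw [List.range_eq_range']
  exact map_succ_range' A 0

theorem order (c a : Char) (hac : a ≠ c) :
    ∀ (t A B : Nat), A + B = t → ∀ (p : List Char → Bool),
      (permsA (t+1) (posL c a t A)).find? p
        = ((List.range' A (B+1) ++ (List.range A).reverse).map (posL c a t)).find? p := by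
  intro t
  induction t with
  | zero =>
    intro A B hAB p
    have hA : A = 0 := by omega
    have hB : B = 0 := by omega
    subst hA; subst hB
    rfl
  | succ t ih =>
    intro A B hAB p
    cases A with
    | zero =>
      have hB : B = t + 1 := by omega
      subst hB
      have hxs : posL c a (t+1) 0 = a :: List.replicate (t+1) c := posL_zero c a (t+1)
      have hpicks : picksA (a :: List.replicate (t+1) c)
          = (a, List.replicate (t+1) c) :: List.replicate (t+1) (c, a :: List.replicate t c) := by
        simpa using picksA_aRep a c (t+1)
      have hstream : permsA (t+2) (posL c a (t+1) 0)
          = ((permsA (t+1) (List.replicate (t+1) c)).map (fun q => a :: q))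
            ++ (List.replicate (t+1) (c, a :: List.replicate t c)).flatMap
                 (fun pr => (permsA (t+1) pr.2).map (fun q => pr.1 :: q)) := by
        rw [hxs]
        rw [show permsA (t+2) (a :: List.replicate (t+1) c)
            = (picksA (a :: List.replicate (t+1) c)).flatMap
                (fun pr => (permsA (t+1) pr.2).map (fun q => pr.1 :: q)) from rfl]
        rw [hpicks, List.flatMap_cons]
      rw [hstream, List.find?_append, find?_Zblock p c a t,
        find?_flatMap_replicate (t+1)]
      simp only [Nat.succ_ne_zero, if_false]
      rw [show (a :: List.replicate t c) = posL c a t 0 from (posL_zero c a t).symm]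
      rw [consBlock c a t 0 t (ih 0 t (by omega)) p]
      have hRHS : List.range' 0 (t+1+1) ++ (List.range 0).reverse
          = 0 :: (List.range' 1 (t+1) ++ (List.range' 1 0).reverse) := by
        simp [List.range'_succ]
      rw [hRHS, List.map_cons]
      by_cases hp0 : p (posL c a (t+1) 0)
      · rw [List.find?_cons_of_pos (by simpa using hp0)]
        simp [hp0]
      · rw [List.find?_cons_of_neg (by simpa using hp0)]
        simp [hp0]
    | succ A' =>
      have hA'B : A' + B = t := by omega
      have e1 : List.replicate A' c ++ a :: List.replicate B c = posL c a t A' := by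
        simp only [posL]
        rw [show t - A' = B from by omega]
      have e2 : List.replicate (A'+1) c ++ List.replicate B c = List.replicate (t+1) c := by
        rw [← List.replicate_add, show A' + 1 + B = t + 1 from by omega]
      have hxs : posL c a (t+1) (A'+1)
          = List.replicate (A'+1) c ++ a :: List.replicate B c := by
        simp only [posL]
        rw [show t + 1 - (A'+1) = B from by omega]
      have hpicks : picksA (List.replicate (A'+1) c ++ a :: List.replicate B c)
          = List.replicate (A'+1) (c, posL c a t A')
            ++ ((a, List.replicate (t+1) c)
                :: List.replicate B (c, List.replicate (A'+1) c ++ a :: List.replicate (B-1) c)) := by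
        rw [picksA_replicate_append c A' (a :: List.replicate B c),
          picksA_aRep a c B, List.map_cons, List.map_replicate, e1, e2]
      have hstream : permsA (t+2) (posL c a (t+1) (A'+1))
          = (List.replicate (A'+1) (c, posL c a t A')).flatMap
              (fun pr => (permsA (t+1) pr.2).map (fun q => pr.1 :: q))
            ++ (((permsA (t+1) (List.replicate (t+1) c)).map (fun q => a :: q))
              ++ (List.replicate B (c, List.replicate (A'+1) c ++ a :: List.replicate (B-1) c)).flatMap
                   (fun pr => (permsA (t+1) pr.2).map (fun q => pr.1 :: q))) := by
        rw [hxs]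
        rw [show permsA (t+2) (List.replicate (A'+1) c ++ a :: List.replicate B c)
            = (picksA (List.replicate (A'+1) c ++ a :: List.replicate B c)).flatMap
                (fun pr => (permsA (t+1) pr.2).map (fun q => pr.1 :: q)) from ?_]
        · rw [hpicks, List.flatMap_append, List.flatMap_cons]
        · cases h : List.replicate (A'+1) c ++ a :: List.replicate B c with
          | nil => simp at h
          | cons z zs => rfl
      -- the shared first segment
      have hR : ((List.range' (A'+1) (B+1) ++ (List.range (A'+1)).reverse).map
            (posL c a (t+1))).find? p
          = (((List.range' (A'+1) (B+1) ++ (List.range' 1 A').reverse).map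
              (posL c a (t+1))).find? p).or
            (if p (posL c a (t+1) 0) then some (posL c a (t+1) 0) else none) := by
        rw [show List.range' (A'+1) (B+1) ++ (List.range (A'+1)).reverse
            = (List.range' (A'+1) (B+1) ++ (List.range' 1 A').reverse) ++ [0] from ?_]
        · rw [List.map_append, List.find?_append]
          congr 1
          simp [List.find?_singleton]
        · rw [List.append_assoc]
          congr 1
          rw [List.range_eq_range', List.range'_succ, List.reverse_cons]
      rw [hstream, List.find?_append, List.find?_append,
        find?_flatMap_replicate (A'+1), find?_Zblock p c a t]
      simp only [Nat.succ_ne_zero, if_false]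
      rw [consBlock c a t A' B (fun p => ih A' B hA'B p) p, hR]
      cases hF : ((List.range' (A'+1) (B+1) ++ (List.range' 1 A').reverse).map
          (posL c a (t+1))).find? p with
      | some v => rw [Option.some_or, Option.some_or]
      | none =>
        rw [Option.none_or, Option.none_or]
        by_cases hp0 : p (posL c a (t+1) 0)
        · simp [hp0]
        · simp only [hp0, Bool.false_eq_true, if_false, Option.none_or]
          cases B with
          | zero => rfl
          | succ B' =>
            rw [find?_flatMap_replicate (B'+1)]
            simp only [Nat.succ_ne_zero, if_false]
            have hX : List.replicate (A'+1) c ++ a :: List.replicate (B'+1-1) c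
                = posL c a t (A'+1) := by
              simp only [posL]
              rw [show t - (A'+1) = B'+1-1 from by omega]
            rw [hX]
            rw [List.find?_eq_none]
            intro x hx
            obtain ⟨q, hq, rfl⟩ := List.mem_map.mp hx
            obtain ⟨i, hit, rfl⟩ := mem_permsA_posL hac (by omega) hq
            rw [cons_posL]
            refine List.find?_eq_none.mp hF (posL c a (t+1) (i+1)) ?_
            apply List.mem_map.mpr
            refine ⟨i+1, ?_, rfl⟩
            rw [List.mem_append]
            by_cases hge : A' + 1 ≤ i + 1
            · left
              rw [List.mem_range'_1]
              omega
            · right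
              rw [List.mem_reverse, List.mem_range'_1]
              omega

theorem first_decomp (a c : Char) (b : Nat) (hb : 1 ≤ b) :
    ∀ (u : List Char),
      ∃ pre post,
        permsA (u ++ a :: List.replicate b c).length (u ++ a :: List.replicate b c)
          = pre ++ (u ++ c :: a :: List.replicate (b-1) c) :: post
        ∧ ∀ p ∈ pre, p = u ++ a :: List.replicate b c := by
  intro u
  induction u with
  | nil =>
    obtain ⟨b', rfl⟩ : ∃ b', b = b' + 1 := ⟨b - 1, by omega⟩
    simp only [List.nil_append]
    have hlen : (a :: List.replicate (b'+1) c).length = (b'+1) + 1 := by simp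
    rw [hlen]
    have hpicks : picksA (a :: List.replicate (b'+1) c)
        = (a, List.replicate (b'+1) c)
          :: ((c, a :: List.replicate b' c) :: List.replicate b' (c, a :: List.replicate b' c)) := by
      rw [picksA_aRep a c (b'+1)]
      rfl
    obtain ⟨r, hr⟩ := permsA_head (b'+1) (a :: List.replicate b' c) (by simp)
    refine ⟨(permsA (b'+1) (List.replicate (b'+1) c)).map (fun q => a :: q),
      r.map (fun q => c :: q)
        ++ (List.replicate b' (c, a :: List.replicate b' c)).flatMap
             (fun pr => (permsA (b'+1) pr.2).map (fun q => pr.1 :: q)), ?_, ?_⟩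
    · rw [show permsA ((b'+1)+1) (a :: List.replicate (b'+1) c)
          = (picksA (a :: List.replicate (b'+1) c)).flatMap
              (fun pr => (permsA (b'+1) pr.2).map (fun q => pr.1 :: q)) from rfl]
      rw [hpicks, List.flatMap_cons, List.flatMap_cons, hr]
      try simp
    · intro p hp
      obtain ⟨q, hq, rfl⟩ := List.mem_map.mp hp
      have : q.Perm (List.replicate (b'+1) c) :=
        permsA_perm (b'+1) _ q (by simp) hq
      rw [List.perm_replicate.mp this]
  | cons x u' ih =>
    obtain ⟨pre', post', hdec, hpre⟩ := ih
    refine ⟨pre'.map (fun q => x :: q),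
      post'.map (fun q => x :: q)
        ++ ((picksA (u' ++ a :: List.replicate b c)).map (fun pr => (pr.1, x :: pr.2))).flatMap
             (fun pr => (permsA ((u' ++ a :: List.replicate b c).length) pr.2).map
               (fun q => pr.1 :: q)), ?_, ?_⟩
    · rw [show ((x :: u') ++ a :: List.replicate b c).length
          = (u' ++ a :: List.replicate b c).length + 1 from rfl]
      rw [show permsA ((u' ++ a :: List.replicate b c).length + 1)
            ((x :: u') ++ a :: List.replicate b c)
          = (picksA ((x :: u') ++ a :: List.replicate b c)).flatMap
              (fun pr => (permsA ((u' ++ a :: List.replicate b c).length) pr.2).map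
                (fun q => pr.1 :: q)) from rfl]
      rw [show picksA ((x :: u') ++ a :: List.replicate b c)
          = (x, u' ++ a :: List.replicate b c)
            :: (picksA (u' ++ a :: List.replicate b c)).map (fun pr => (pr.1, x :: pr.2))
          from rfl]
      rw [List.flatMap_cons, hdec]
      simp [List.append_assoc]
    · intro p hp
      obtain ⟨q, hq, rfl⟩ := List.mem_map.mp hp
      rw [hpre q hq]
      rfl

theorem shape_of_rev (a c : Char) (hac : a ≠ c) (u : List Char) (b : Nat) (hb : 1 ≤ b)
    (h : u ++ c :: a :: List.replicate (b-1) c = (u ++ a :: List.replicate b c).reverse) :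
    u = List.replicate u.length c ∧ b = u.length + 1 := by
  have hrev : (u ++ a :: List.replicate b c).reverse
      = List.replicate b c ++ a :: u.reverse := by
    rw [List.reverse_append, List.reverse_cons, List.reverse_replicate, List.append_assoc]
    rfl
  rw [hrev] at h
  have hget : ∀ i : Nat, (u ++ c :: a :: List.replicate (b-1) c)[i]?
      = (List.replicate b c ++ a :: u.reverse)[i]? := fun i => congrArg (·[i]?) h
  have hm1 : (u ++ c :: a :: List.replicate (b-1) c)[u.length + 1]? = some a := by
    rw [List.getElem?_append_right (by omega)]
    simp [show u.length + 1 - u.length = 1 from by omega]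
  have hble : b ≤ u.length + 1 := by
    by_contra hgt
    have := hget (u.length + 1)
    rw [hm1, List.getElem?_append_left (by simp; omega), List.getElem?_replicate] at this
    rw [if_pos (by omega)] at this
    exact hac (by simpa using this)
  have hbgt : u.length < b := by
    by_contra hble2
    have hbe : b ≤ u.length := by omega
    -- index b-1 in two ways
    have h1 : (u ++ c :: a :: List.replicate (b-1) c)[b-1]? = u[b-1]? := by
      rw [List.getElem?_append_left (by omega)]
    have h2 : (List.replicate b c ++ a :: u.reverse)[b-1]? = some c := by
      rw [List.getElem?_append_left (by simp; omega), List.getElem?_replicate, if_pos (by omega)]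
    have huc : u[b-1]? = some c := by rw [← h1, hget (b-1), h2]
    -- the reversed equation
    have h' : List.replicate (b-1) c ++ a :: c :: u.reverse = u ++ a :: List.replicate b c := by
      have := congrArg List.reverse h
      rw [List.reverse_append, List.reverse_cons, List.reverse_cons, List.reverse_replicate,
        List.append_assoc, List.append_assoc, List.reverse_append, List.reverse_cons,
        List.reverse_replicate, List.reverse_reverse] at this
      simpa using this
    have hga : (List.replicate (b-1) c ++ a :: c :: u.reverse)[b-1]? = some a := by
      rw [List.getElem?_append_right (by simp), List.length_replicate]
      simp
    have hua : u[b-1]? = some a := by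
      have := congrArg (·[b-1]?) h'
      simp only at this
      rw [hga, List.getElem?_append_left (by omega)] at this
      exact this.symm
    rw [huc] at hua
    exact hac (by simpa using hua.symm)
  have hbm : b = u.length + 1 := by omega
  refine ⟨?_, hbm⟩
  have huc : ∀ i : Nat, i < u.length → u[i]? = some c := by
    intro i hi
    have := hget i
    rw [List.getElem?_append_left (by omega), List.getElem?_append_left (by simp; omega),
      List.getElem?_replicate, if_pos (by omega)] at this
    exact this
  have : ∀ y ∈ u, y = c := by
    intro y hy
    obtain ⟨i, hi, rfl⟩ := List.mem_iff_getElem.mp hy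
    have := huc i hi
    rw [List.getElem?_eq_getElem hi] at this
    simpa using this
  exact List.eq_replicate_of_mem this

theorem lastDiffB_none (s : List Char) :
    ∀ k, lastDiffB s k = none → ∀ j, j < k → s.getD j ' ' = s.getD (j+1) ' ' := by
  intro k
  induction k with
  | zero => intro _ j hj; omega
  | succ k ih =>
    intro h j hj
    rw [lastDiffB] at h
    by_cases hc : s.getD k ' ' ≠ s.getD (k+1) ' '
    · rw [if_pos hc] at h; exact absurd h (by simp)
    · rw [if_neg hc] at h
      rcases Nat.lt_succ_iff_lt_or_eq.mp hj with hj' | rfl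
      · exact ih h j hj'
      · exact not_not.mp hc

theorem lastDiffB_some (s : List Char) :
    ∀ k m, lastDiffB s k = some m →
      m + 1 ≤ k ∧ s.getD m ' ' ≠ s.getD (m+1) ' '
        ∧ ∀ j, m < j → j < k → s.getD j ' ' = s.getD (j+1) ' ' := by
  intro k
  induction k with
  | zero => intro m h; exact absurd h (by simp [lastDiffB])
  | succ k ih =>
    intro m h
    rw [lastDiffB] at h
    by_cases hc : s.getD k ' ' ≠ s.getD (k+1) ' '
    · rw [if_pos hc] at h
      obtain rfl : k = m := by simpa using h
      exact ⟨Nat.le_refl _, hc, fun j h1 h2 => by omega⟩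
    · rw [if_neg hc] at h
      obtain ⟨h1, h2, h3⟩ := ih m h
      refine ⟨by omega, h2, fun j hj1 hj2 => ?_⟩
      rcases Nat.lt_succ_iff_lt_or_eq.mp hj2 with hj' | rfl
      · exact h3 j hj1 hj'
      · exact not_not.mp hc

theorem adj_all_eq (s : List Char)
    (h : ∀ j, j < s.length - 1 → s.getD j ' ' = s.getD (j+1) ' ') :
    s = List.replicate s.length (s.getD 0 ' ') := by
  have key : ∀ i, i < s.length → s.getD i ' ' = s.getD 0 ' ' := by
    intro i
    induction i with
    | zero => intro _; rfl
    | succ i ih =>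
      intro hi
      rw [← h i (by omega)]
      exact ih (by omega)
  rw [List.eq_replicate_iff]
  refine ⟨rfl, ?_⟩
  intro y hy
  obtain ⟨i, hi, rfl⟩ := List.mem_iff_getElem.mp hy
  rw [← List.getD_eq_getElem s ' ' hi]
  exact key i hi

theorem suffix_replicate (s : List Char) (m : Nat) (hm : m + 2 ≤ s.length)
    (hadj : ∀ j, m < j → j < s.length - 1 → s.getD j ' ' = s.getD (j+1) ' ') :
    s.drop (m+1) = List.replicate (s.length - m - 1) (s.getD (m+1) ' ') := by
  have key : ∀ i, m + 1 + i < s.length → s.getD (m+1+i) ' ' = s.getD (m+1) ' ' := by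
    intro i
    induction i with
    | zero => intro _; rfl
    | succ i ih =>
      intro hi
      rw [show m + 1 + (i+1) = (m+1+i) + 1 from by omega]
      rw [← hadj (m+1+i) (by omega) (by omega)]
      exact ih (by omega)
  rw [List.eq_replicate_iff]
  refine ⟨by rw [List.length_drop]; omega, ?_⟩
  intro y hy
  obtain ⟨i, hi, rfl⟩ := List.mem_iff_getElem.mp hy
  rw [List.getElem_drop]
  rw [List.length_drop] at hi
  rw [← List.getD_eq_getElem s ' ' (by omega)]
  exact key i (by omega)

theorem firstAList_eq (pred : List Char → Bool) (n : Nat)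
    (ih : ∀ ys acc, firstA pred n ys acc
      = ((permsA n ys).map (fun t => acc.reverse ++ t)).find? pred) :
    ∀ (l : List (Char × List Char)) (acc : List Char),
      firstAList pred n l acc
        = ((l.flatMap (fun pr => (permsA n pr.2).map (fun q => pr.1 :: q))).map
            (fun t => acc.reverse ++ t)).find? pred := by
  intro l
  induction l with
  | nil => intro acc; simp [firstAList]
  | cons p rest ihl =>
    intro acc
    obtain ⟨y, ys⟩ := p
    rw [List.flatMap_cons, List.map_append, List.find?_append]
    rw [show firstAList pred n ((y, ys) :: rest) acc
        = (match firstA pred n ys (y :: acc) with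
            | some t => some t
            | none => firstAList pred n rest acc) from by rw [firstAList]]
    rw [ih ys (y :: acc), ihl acc]
    have hmap : ((permsA n ys).map (fun q => y :: q)).map (fun t => acc.reverse ++ t)
        = (permsA n ys).map (fun t => (y :: acc).reverse ++ t) := by
      rw [List.map_map]
      apply List.map_congr_left
      intro t _
      simp
    rw [hmap]
    cases ((permsA n ys).map (fun t => (y :: acc).reverse ++ t)).find? pred with
    | some v => rfl
    | none => rfl

theorem firstA_eq (pred : List Char → Bool) :
    ∀ (n : Nat) (xs acc : List Char),
      firstA pred n xs acc
        = ((permsA n xs).map (fun t => acc.reverse ++ t)).find? pred := by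
  intro n
  induction n with
  | zero =>
    intro xs acc
    rw [show permsA 0 xs = [[]] from rfl]
    rw [show firstA pred 0 xs acc
        = (if pred acc.reverse then some acc.reverse else none) from by rw [firstA]]
    simp [List.find?_singleton]
  | succ n ih =>
    intro xs acc
    rw [show firstA pred (n+1) xs acc = firstAList pred n (picksA xs) acc from by rw [firstA]]
    rw [firstAList_eq pred n ih (picksA xs) acc]
    rfl

theorem firstA_eq_find? (pred : List Char → Bool) (s : List Char) :
    firstA pred s.length s [] = (permsA s.length s).find? pred := by
  rw [firstA_eq]
  have : (fun t => List.reverse [] ++ t) = fun t : List Char => t := by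
    funext t; rfl
  rw [this, List.map_id']

theorem predFalse_left {x s : List Char} (h : x = s) :
    ((x != s) && (x != s.reverse)) = false := by
  subst h; simp

theorem predFalse_right {x s : List Char} (h : x = s.reverse) :
    ((x != s) && (x != s.reverse)) = false := by
  rw [h]; simp

theorem predTrue {x s : List Char} (h1 : x ≠ s) (h2 : x ≠ s.reverse) :
    ((x != s) && (x != s.reverse)) = true := by
  rw [Bool.and_eq_true, bne_iff_ne, bne_iff_ne]; exact ⟨h1, h2⟩

theorem master (s : List Char) :
    (match (permsA s.length s).find? (fun p => p != s && p != s.reverse) with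
      | some p => String.ofList p
      | none => "None") =
    (match lastDiffB s (s.length - 1) with
      | none => "None"
      | some m =>
        let t1 := s.take m ++ s.getD (m+1) ' ' :: s.getD m ' ' :: s.drop (m+2)
        if t1 ≠ s.reverse then String.ofList t1
        else if s.length = 2 then "None"
        else String.ofList (List.replicate (m+2) (s.getD (s.length - 1) ' ')
               ++ s.getD m ' ' :: List.replicate (m-1) (s.getD (s.length - 1) ' '))) := by
  cases hld : lastDiffB s (s.length - 1) with
  | none =>
    have hadj := lastDiffB_none s _ hld
    have hrep : s = List.replicate s.length (s.getD 0 ' ') :=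
      adj_all_eq s (fun j hj => hadj j (by omega))
    have hfind : (permsA s.length s).find? (fun p => p != s && p != s.reverse) = none := by
      rw [List.find?_eq_none]
      intro p hp
      have hperm := permsA_perm s.length s p rfl hp
      have hps : p = s := by
        conv_rhs => rw [hrep]
        exact List.perm_replicate.mp (by rw [← hrep]; exact hperm)
      simp [hps]
    rw [hfind]
  | some m =>
    obtain ⟨hmk, hac, hadj⟩ := lastDiffB_some s _ m hld
    have hn : m + 2 ≤ s.length := by omega
    have hbpos : 1 ≤ s.length - m - 1 := by omega
    have hulen : (s.take m).length = m := by rw [List.length_take]; omega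
    have hdrop := suffix_replicate s m hn hadj
    have hsplit : s = s.take m
        ++ s.getD m ' ' :: List.replicate (s.length - m - 1) (s.getD (m+1) ' ') := by
      conv_lhs => rw [← List.take_append_drop m s]
      congr 1
      rw [List.drop_eq_getElem_cons (show m < s.length by omega), ← hdrop,
        List.getD_eq_getElem s ' ' (show m < s.length by omega)]
    have hdrop2 : s.drop (m+2)
        = List.replicate (s.length - m - 2) (s.getD (m+1) ' ') := by
      rw [show m + 2 = (m+1) + 1 from rfl, ← List.drop_drop, hdrop,
        show s.length - m - 1 = (s.length - m - 2) + 1 from by omega,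
        List.replicate_succ, List.drop_one, List.tail_cons]
    have ht1 : s.take m ++ s.getD (m+1) ' ' :: s.getD m ' ' :: s.drop (m+2)
        = s.take m ++ s.getD (m+1) ' ' :: s.getD m ' '
            :: List.replicate (s.length - m - 1 - 1) (s.getD (m+1) ' ') := by
      rw [hdrop2, show s.length - m - 1 - 1 = s.length - m - 2 from by omega]
    obtain ⟨pre, post, hdec, hpre⟩ :=
      first_decomp (s.getD m ' ') (s.getD (m+1) ' ') (s.length - m - 1) hbpos (s.take m)
    rw [← hsplit] at hdec hpre
    by_cases hrev : (s.take m ++ s.getD (m+1) ' ' :: s.getD m ' '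
        :: List.replicate (s.length - m - 1 - 1) (s.getD (m+1) ' ')) = s.reverse
    · -- the swapped pair equals reversed S: the special shape
      have hshape := shape_of_rev (s.getD m ' ') (s.getD (m+1) ' ')
        (by simpa using hac) (s.take m) (s.length - m - 1) hbpos (by rw [← hsplit]; exact hrev)
      obtain ⟨hu, hbm⟩ := hshape
      rw [hulen] at hu hbm
      have hlen2 : s.length = 2*m + 2 := by omega
      have hspos : s = posL (s.getD (m+1) ' ') (s.getD m ' ') (2*m+1) m := by
        conv_lhs => rw [hsplit]
        rw [hu]
        simp only [posL]
        rw [show 2*m+1-m = m+1 from by omega, show s.length - m - 1 = m + 1 from by omega]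
      have hrevpos : s.reverse
          = posL (s.getD (m+1) ' ') (s.getD m ' ') (2*m+1) (m+1) := by
        rw [← hrev, hu, show s.length - m - 1 - 1 = m from by omega]
        simp [posL, List.replicate_succ', List.append_assoc,
          show 2*m+1-(m+1) = m from by omega]
      have horder := order (s.getD (m+1) ' ') (s.getD m ' ') (by simpa using hac)
        (2*m+1) m (m+1) (by omega) (fun p => p != s && p != s.reverse)
      have hfind := horder
      rw [← hspos, show (2*m+1)+1 = s.length from by omega] at hfind
      cases m with
      | zero =>
        have hfind2 : (permsA s.length s).find? (fun p => p != s && p != s.reverse)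
            = none := by
          rw [hfind]
          rw [show (List.range' 0 (0+1+1) ++ (List.range 0).reverse) = [0, 1] from rfl,
            List.map_cons, List.map_cons, List.map_nil]
          rw [List.find?_cons_of_neg (p := fun p => p != s && p != s.reverse)
              (ne_true_of_eq_false (predFalse_left hspos.symm)),
            List.find?_cons_of_neg (p := fun p => p != s && p != s.reverse)
              (ne_true_of_eq_false (predFalse_right hrevpos.symm))]
          rfl
        rw [hfind2]
        simp only
        rw [ht1, if_neg (not_not_intro hrev), if_pos (show s.length = 2 from by omega)]
      | succ m' =>
        have hltne1 : posL (s.getD (m'+1+1) ' ') (s.getD (m'+1) ' ') (2*(m'+1)+1) (m'+1+2)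
            ≠ s := by
          intro h
          exact posL_ne (t := 2*(m'+1)+1) (i := m'+1) (j := m'+1+2)
            (by simpa using hac) (by omega) (by omega) (h.trans hspos).symm
        have hltne2 : posL (s.getD (m'+1+1) ' ') (s.getD (m'+1) ' ') (2*(m'+1)+1) (m'+1+2)
            ≠ s.reverse := by
          intro h
          exact posL_ne (t := 2*(m'+1)+1) (i := m'+1+1) (j := m'+1+2)
            (by simpa using hac) (by omega) (by omega) (h.trans hrevpos).symm
        have hfind2 : (permsA s.length s).find? (fun p => p != s && p != s.reverse)
            = some (posL (s.getD (m'+1+1) ' ') (s.getD (m'+1) ' ') (2*(m'+1)+1) (m'+1+2)) := by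
          rw [hfind]
          rw [List.range'_succ, List.range'_succ, List.range'_succ]
          simp only [List.map_cons, List.map_append, List.cons_append]
          rw [List.find?_cons_of_neg (p := fun p => p != s && p != s.reverse)
              (ne_true_of_eq_false (predFalse_left hspos.symm)),
            List.find?_cons_of_neg (p := fun p => p != s && p != s.reverse)
              (ne_true_of_eq_false (predFalse_right hrevpos.symm)),
            List.find?_cons_of_pos (p := fun p => p != s && p != s.reverse)
              (predTrue hltne1 hltne2)]
        rw [hfind2]
        simp only
        rw [ht1, if_neg (not_not_intro hrev), if_neg (show ¬ s.length = 2 from by omega)]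
        have hlast : s.getD (s.length - 1) ' ' = s.getD (m'+1+1) ' ' := by
          rw [List.getD_eq_getElem?_getD, List.getD_eq_getElem?_getD,
            show s.length - 1 = (m'+1+1) + (m'+1) from by omega, ← List.getElem?_drop, hdrop,
            List.getElem?_replicate, if_pos (by omega),
            List.getElem?_eq_getElem (show m'+1+1 < s.length from by omega),
            List.getD_eq_getElem s ' ' (show m'+1+1 < s.length from by omega)]
        rw [hlast]
        congr 1
        simp only [posL]
        rw [show 2*(m'+1)+1-(m'+1+2) = m'+1-1 from by omega]
    · -- generic case: the adjacent swap is the answer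
      have hne1 : (s.take m ++ s.getD (m+1) ' ' :: s.getD m ' '
          :: List.replicate (s.length - m - 1 - 1) (s.getD (m+1) ' ')) ≠ s := by
        conv_rhs => rw [hsplit]
        intro hcontra
        have := List.append_cancel_left hcontra
        rw [List.cons.injEq] at this
        exact hac this.1.symm
      have hfind : (permsA s.length s).find? (fun p => p != s && p != s.reverse)
          = some (s.take m ++ s.getD (m+1) ' ' :: s.getD m ' '
              :: List.replicate (s.length - m - 1 - 1) (s.getD (m+1) ' ')) := by
        rw [hdec, List.find?_append]
        have h1 : pre.find? (fun p => p != s && p != s.reverse) = none := by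
          rw [List.find?_eq_none]
          intro x hx
          rw [hpre x hx]
          simp
        rw [h1, Option.none_or, List.find?_cons_of_pos (p := fun p => p != s && p != s.reverse)
          (predTrue hne1 hrev)]
      rw [hfind]
      simp only
      rw [ht1, if_pos hrev]

-- ===== VERDICT (by name: the statement is the Claim_ definition above) =====
theorem solve_spec : Claim_equal_solve := by
  intro N S _
  unfold Spec_solve
  have h1 : solve N S
      = (match (permsA S.toList.length S.toList).find?
            (fun p => p != S.toList && p != S.toList.reverse) with
          | some p => String.ofList p
          | none => "None") := by
    show (match firstA (fun p => p != S.toList && p != S.toList.reverse)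
            S.toList.length S.toList [] with
          | some p => String.ofList p
          | none => "None") = _
    rw [firstA_eq_find?]
  rw [h1]
  exact master S.toList
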